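-- pv_equiv track=rewrite | github.com/YashB63/GFG-Daily-Questions | Day 284/Star elements/star_elements.py | getStar
-- ===== SOURCE A (Python) =====
-- def getStar(arr):
--     elm = []
--     n = len(arr)
--     greater = float("-inf")
--     for i in range(n-1, -1, -1):
--         if arr[i] > greater:
--             elm.append(arr[i])
--             greater = arr[i]
--     return sorted(elm, reverse=True)
-- ===== SOURCE B (Python) =====
-- def getStar(arr):
--     stack = []
--     for x in arr:
--         while stack and stack[-1] <= x:
--             stack.pop()
--         stack.append(x)
--     return stack
-- ===== Notes on version B (the rewrite author's own statement) =====
-- stated objective: alternative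
-- what changed: Replaced A's right-to-left leader scan with a running max plus a final sorted(..., reverse=True) by a single left-to-right monotone stack (pop while top <= x, then push), whose stack is already the answer in descending order with no final sort.
import Mathlib
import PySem

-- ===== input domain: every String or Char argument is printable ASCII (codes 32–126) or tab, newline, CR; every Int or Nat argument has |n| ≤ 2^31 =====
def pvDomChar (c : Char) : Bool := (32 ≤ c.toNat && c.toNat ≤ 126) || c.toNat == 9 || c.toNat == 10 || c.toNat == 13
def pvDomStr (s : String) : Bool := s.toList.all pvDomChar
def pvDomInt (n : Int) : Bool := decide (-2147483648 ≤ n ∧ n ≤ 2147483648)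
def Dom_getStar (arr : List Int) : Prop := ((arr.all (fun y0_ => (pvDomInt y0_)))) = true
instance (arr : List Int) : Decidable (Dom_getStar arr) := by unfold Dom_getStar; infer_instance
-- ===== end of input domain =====

-- B replaces A's reverse scan + final sort with a single left-to-right monotone-stack pass
-- whose stack is already in descending order (objective: alternative decomposition).


-- ===== PORT A =====
-- greater = float("-inf") is modelled as Option Int, none standing for -inf
-- (exact: -inf compares below every int, and greater only ever holds -inf or an element).
def getStar (arr : List Int) : List Int :=
  let n : Int := arr.length
  let st :=
    (PySem.List.pyRange (n - 1) (-1) (-1)).foldl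
      (fun (s : List Int × Option Int) i =>
        let v := PySem.List.pyGetD arr i 0
        if (match s.2 with | none => true | some g => decide (g < v)) = true then
          (s.1 ++ [v], some v)
        else s)
      ([], none)
  PySem.List.sorted st.1 (fun x => x) true

-- ===== PORT B =====
-- the 'while stack and stack[-1] <= x: stack.pop()' loop (pops from the END of the list)
def popLe (st : List Int) (x : Int) : List Int :=
  match h : st.getLast? with
  | some t => if t ≤ x then popLe st.dropLast x else st
  | none => st
termination_by st.length
decreasing_by
  cases st with
  | nil => simp at h
  | cons a l => simp [List.length_dropLast]

def getStar_alt (arr : List Int) : List Int :=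
  arr.foldl (fun st x => popLe st x ++ [x]) []

-- ===== PRECONDITION & SPEC =====
def Spec_getStar (arr : List Int) (out : List Int) : Prop := out = getStar_alt arr
instance (arr : List Int) (out : List Int) : Decidable (Spec_getStar arr out) := by unfold Spec_getStar; infer_instance

-- ===== CLAIM (what is proved, stated in full; the proofs are below) =====
def Claim_equal_getStar : Prop := ∀ (arr : List Int), Dom_getStar arr → Spec_getStar arr (getStar arr)

-- ===== LEMMAS AND PROOFS =====

-- the star elements of l, in descending order (right-recursion specification)
def stars : List Int → List Int
  | [] => []
  | x :: xs =>
    let s := stars xs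
    match s.head? with
    | none => [x]
    | some h => if h < x then x :: s else s

theorem stars_pairwise_head (l : List Int) :
    (stars l).Pairwise (· > ·) ∧ ∀ y ∈ stars l, ∀ h, (stars l).head? = some h → y ≤ h := by
  induction l with
  | nil => simp [stars]
  | cons x xs ih =>
    obtain ⟨hp, hm⟩ := ih
    simp only [stars]
    cases hh : (stars xs).head? with
    | none => simp
    | some h =>
      simp only
      split_ifs with hx
      · refine ⟨List.pairwise_cons.mpr ⟨fun y hy => lt_of_le_of_lt (hm y hy h hh) hx, hp⟩, ?_⟩
        intro y hy h' hh'
        simp only [List.head?_cons, Option.some.injEq] at hh'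
        subst hh'
        rcases List.mem_cons.mp hy with rfl | hy
        · exact le_refl _
        · exact le_of_lt (lt_of_le_of_lt (hm y hy h hh) hx)
      · exact ⟨hp, hm⟩

theorem stars_pairwise (l : List Int) : (stars l).Pairwise (· > ·) :=
  (stars_pairwise_head l).1

theorem stars_append_singleton (p : List Int) (x : Int) :
    stars (p ++ [x]) = (stars p).takeWhile (fun a => decide (x < a)) ++ [x] := by
  induction p with
  | nil => simp [stars]
  | cons a q ih =>
    simp only [List.cons_append, stars, ih]
    cases hs : (stars q).head? with
    | none =>
      rw [List.head?_eq_none_iff.mp hs]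
      simp only [List.takeWhile_nil, List.nil_append, List.head?_cons]
      by_cases hax : x < a
      · simp [hax, List.takeWhile, not_lt.mpr (le_of_lt hax)]
      · simp [hax, not_lt.mp hax, List.takeWhile]
    | some h =>
      obtain ⟨t, ht⟩ : ∃ t, stars q = h :: t := by
        cases hq : stars q with
        | nil => rw [hq] at hs; simp at hs
        | cons y t => rw [hq] at hs; simp at hs; exact ⟨t, by rw [hs]⟩
      rw [ht]
      by_cases hhx : x < h
      · -- h > x : head of takeWhile(>x)(h::t) ++ [x] is h
        simp only [List.takeWhile_cons, decide_eq_true_eq, hhx, if_pos, List.cons_append,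
          List.head?_cons, hs]
        by_cases hah : h < a
        · have hax : x < a := lt_trans hhx hah
          simp [hah, hax, List.takeWhile_cons, hhx]
        · simp [hah, List.takeWhile_cons, hhx]
      · -- h ≤ x : takeWhile(>x)(h::t) = [], head is x
        simp only [List.takeWhile_cons, decide_eq_true_eq, hhx, if_neg, List.nil_append,
          List.head?_cons, hs]
        by_cases hax : x < a
        · have hah : h < a := lt_of_le_of_lt (not_lt.mp hhx) hax
          simp [hax, hah, List.takeWhile_cons, hhx]
        · by_cases hah : h < a
          · simp [hax, hah, List.takeWhile_cons, hhx]
          · simp [hax, hah, List.takeWhile_cons, hhx]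

theorem takeWhile_concat_of_neg (p : Int → Bool) (u : List Int) (t : Int) (h : p t = false) :
    (u ++ [t]).takeWhile p = u.takeWhile p := by
  induction u with
  | nil => simp [List.takeWhile, h]
  | cons a v ih => simp [List.takeWhile_cons, ih]

theorem popLe_concat (u : List Int) (t x : Int) :
    popLe (u ++ [t]) x = if t ≤ x then popLe u x else u ++ [t] := by
  rw [popLe]
  split
  · next t' h' =>
      rw [List.getLast?_concat] at h'
      injection h' with h'
      subst h'
      rw [List.dropLast_concat]
  · next h' => rw [List.getLast?_concat] at h'; exact absurd h' (by simp)

theorem popLe_eq_takeWhile (l : List Int) (x : Int) (hl : l.Pairwise (· > ·)) :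
    popLe l x = l.takeWhile (fun a => decide (x < a)) := by
  induction l using List.reverseRecOn with
  | nil => rw [popLe]; rfl
  | append_singleton u t ih =>
    rw [List.pairwise_append] at hl
    have hall : ∀ y ∈ u, t < y := fun y hy => by simpa using hl.2.2 y hy t (by simp)
    rw [popLe_concat]
    split_ifs with ht
    · rw [ih hl.1,
        takeWhile_concat_of_neg _ u t (by simp only [decide_eq_false_iff_not, not_lt]; exact ht)]
    · symm
      apply List.takeWhile_eq_self_iff.mpr
      intro a ha
      rcases List.mem_append.mp ha with h1 | h1
      · have := hall a h1
        simp only [decide_eq_true_eq]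
        omega
      · simp only [List.mem_singleton] at h1
        subst h1
        simp only [decide_eq_true_eq]
        omega

theorem alt_loop (p : List Int) :
    p.foldl (fun st x => popLe st x ++ [x]) [] = stars p := by
  induction p using List.reverseRecOn with
  | nil => simp [stars]
  | append_singleton q x ih =>
    rw [List.foldl_append, ih, List.foldl_cons, List.foldl_nil,
      popLe_eq_takeWhile _ _ (stars_pairwise q), stars_append_singleton]

theorem a_loop (p : List Int) :
    p.reverse.foldl
      (fun (s : List Int × Option Int) v =>
        if (match s.2 with | none => true | some g => decide (g < v)) = true then
          (s.1 ++ [v], some v)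
        else s)
      ([], none)
    = ((stars p).reverse, (stars p).head?) := by
  induction p with
  | nil => simp [stars]
  | cons x xs ih =>
    rw [List.reverse_cons, List.foldl_append, ih, List.foldl_cons, List.foldl_nil]
    simp only [stars]
    cases hh : (stars xs).head? with
    | none => simp [List.head?_eq_none_iff.mp hh]
    | some h =>
      simp only
      by_cases hx : h < x
      · simp [hx]
      · simp [hx, hh]

theorem foldl_fused (f : Int → Int) (l : List Int) (init : List Int × Option Int) :
    l.foldl (fun s i =>
        if (match s.2 with | none => true | some g => decide (g < f i)) = true then
          (s.1 ++ [f i], some (f i))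
        else s) init
    = (l.map f).foldl (fun s v =>
        if (match s.2 with | none => true | some g => decide (g < v)) = true then
          (s.1 ++ [v], some v)
        else s) init := by
  induction l generalizing init with
  | nil => rfl
  | cons a t ih => simp only [List.foldl_cons, List.map_cons, ih]

theorem getStar_spec_aux (arr : List Int) : getStar arr = getStar_alt arr := by
  unfold getStar getStar_alt
  dsimp only
  rw [alt_loop]
  have hr : ((arr.length : Int) - 1) + 1 = (arr.length : Int) := by omega
  rw [PySem.List.pyRange_neg_one_eq_reverse]
  rw [show (-1 : Int) + 1 = 0 from rfl, hr]
  rw [foldl_fused (fun i => PySem.List.pyGetD arr i 0)]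
  rw [List.map_reverse, PySem.List.map_pyGetD_pyRange_zero', a_loop]
  apply PySem.List.sorted_rev_eq_of_perm_of_pairwise_gt
  · exact (List.reverse_perm _).symm
  · exact stars_pairwise arr

-- ===== VERDICT (by name: the statement is the Claim_ definition above) =====
theorem getStar_spec : Claim_equal_getStar := by
  intro arr _
  exact getStar_spec_aux arr
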